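-- pv_equiv track=rewrite | github.com/rhkdguskim/Study | Algorithm/python/백준/36진수2.py | replace_with_z
-- ===== SOURCE A (Python) =====
-- def replace_with_z(numbers, to_replace):
--     result = []
--     for number in numbers:
--         new_number = ''
--         for char in number:
--             if char in to_replace:
--                 new_number += 'Z'
--             else:
--                 new_number += char
--         result.append(new_number)
--     return result
-- ===== SOURCE B (Python) =====
-- def replace_with_z(numbers, to_replace):
--     table = str.maketrans({c: 'Z' for c in to_replace if len(c) == 1})
--     return [number.translate(table) for number in numbers]
-- ===== Notes on version B (the rewrite author's own statement) =====
-- stated objective: idiomatic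
-- what changed: B precomputes a translation table once (str.maketrans over the single-character entries of to_replace) and runs one table-driven translate pass per string, instead of an explicit char-by-char loop with a membership scan of to_replace and repeated string concatenation.
import Mathlib
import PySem

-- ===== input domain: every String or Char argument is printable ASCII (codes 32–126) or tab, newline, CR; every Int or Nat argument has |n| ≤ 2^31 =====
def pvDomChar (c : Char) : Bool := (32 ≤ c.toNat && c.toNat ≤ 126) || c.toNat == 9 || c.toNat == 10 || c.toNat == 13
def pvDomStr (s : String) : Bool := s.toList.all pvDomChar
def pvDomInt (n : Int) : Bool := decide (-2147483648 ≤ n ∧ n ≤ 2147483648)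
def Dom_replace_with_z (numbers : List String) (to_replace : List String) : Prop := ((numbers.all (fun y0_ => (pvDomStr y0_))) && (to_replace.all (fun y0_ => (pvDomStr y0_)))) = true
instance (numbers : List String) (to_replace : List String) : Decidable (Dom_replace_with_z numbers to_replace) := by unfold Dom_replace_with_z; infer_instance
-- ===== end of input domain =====

-- ===== PORT A =====
-- Literal port of A: fold over numbers; for each string, fold over its chars,
-- appending 'Z' when the single-char string is in to_replace, else the char.
-- ('char in to_replace' = membership of the one-char string; compared via toList, exact).
def replace_with_z (numbers : List String) (to_replace : List String) : List String :=
  numbers.foldl (fun result number =>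
    result ++ [String.ofList (number.toList.foldl (fun new_number char =>
      new_number ++ (if to_replace.any (fun s => s.toList == [char]) then ['Z'] else [char])) [])]) []

-- ===== PORT B =====
-- Port of B: build the translation table once (the single-character entries of
-- to_replace), then map each string through the table in one pass.
def replace_with_z_alt (numbers : List String) (to_replace : List String) : List String :=
  let table : List Char := to_replace.filterMap (fun s =>
    match s.toList with
    | [c] => some c
    | _ => none)
  numbers.map (fun number =>
    String.ofList (number.toList.map (fun c => if table.contains c then 'Z' else c)))

-- ===== PRECONDITION & SPEC =====
def Spec_replace_with_z (numbers : List String) (to_replace : List String) (out : List String) : Prop := out = replace_with_z_alt numbers to_replace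
instance (numbers : List String) (to_replace : List String) (out : List String) : Decidable (Spec_replace_with_z numbers to_replace out) := by unfold Spec_replace_with_z; infer_instance

-- ===== CLAIM (what is proved, stated in full; the proofs are below) =====
def Claim_equal_replace_with_z : Prop := ∀ (numbers : List String) (to_replace : List String), Dom_replace_with_z numbers to_replace → Spec_replace_with_z numbers to_replace (replace_with_z numbers to_replace)

-- ===== LEMMAS AND PROOFS =====

-- membership scan of A = table lookup of B
theorem table_mem (to_replace : List String) (c : Char) :
    to_replace.any (fun s => s.toList == [c])
      = (to_replace.filterMap (fun s =>
          match s.toList with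
          | [c] => some c
          | _ => none)).contains c := by
  induction to_replace with
  | nil => rfl
  | cons s rest ih =>
    simp only [List.any_cons, List.filterMap_cons]
    cases h : s.toList with
    | nil => simpa [h] using ih
    | cons a tl =>
      cases tl with
      | nil =>
        simp only [h, ih]
        cases Decidable.em (c = a) with
        | inl hc => simp [hc]
        | inr hc => simp [hc, Ne.symm hc]
      | cons b tl' => simpa [h] using ih

-- A's inner char fold = B's map over the chars
theorem inner_eq (tb : List Char) (p : Char → Bool) (hp : ∀ c, p c = tb.contains c)
    (cs acc : List Char) :
    cs.foldl (fun new_number char =>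
      new_number ++ (if p char then ['Z'] else [char])) acc
      = acc ++ cs.map (fun c => if tb.contains c then 'Z' else c) := by
  induction cs generalizing acc with
  | nil => simp
  | cons c cs ih => simp [ih, hp c]; split <;> simp

-- A's outer accumulating fold = B's map
theorem outer_eq (f : String → String) (numbers : List String) (acc : List String) :
    numbers.foldl (fun result number => result ++ [f number]) acc
      = acc ++ numbers.map f := by
  induction numbers generalizing acc with
  | nil => simp
  | cons n ns ih => simp [ih]

-- ===== VERDICT (by name: the statement is the Claim_ definition above) =====
theorem replace_with_z_spec : Claim_equal_replace_with_z := by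
  intro numbers to_replace _
  unfold Spec_replace_with_z replace_with_z replace_with_z_alt
  rw [outer_eq]
  simp only [List.nil_append]
  congr 1
  funext number
  congr 1
  rw [inner_eq _ _ (table_mem to_replace) _ []]
  simp
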